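-- pv_equiv track=rewrite | github.com/cajal-research/RAPTORX | project_utils/unused_imports_generator/unused_imports_checker.py | remove_subtree_dependencies
-- ===== SOURCE A (Python) =====
-- def remove_subtree_dependencies(package_to_remove, package_dependencies):
--     """Recursively find all dependencies of a package to remove."""
--     packages_to_remove = set()
--     packages_to_scan = [package_to_remove]
--     while packages_to_scan:
--         current_package = packages_to_scan.pop()
--         packages_to_remove.add(current_package)
--         for package, dependencies in package_dependencies.items():
--             if package in packages_to_remove:
--                 continue  # Skip if already scheduled for removal
--             if current_package in dependencies:
--                 packages_to_scan.append(package)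
--                 packages_to_remove.add(package)
--     return packages_to_remove
-- ===== SOURCE B (Python) =====
-- def remove_subtree_dependencies(package_to_remove, package_dependencies):
--     """Recursively find all dependencies of a package to remove.
--
--     Builds a reverse-dependency index (dep -> dependents, in dict order) once,
--     then walks a stack over the index, scheduling each popped package's
--     not-yet-removed dependents as a batch.
--     """
--     dependents = {}
--     for package, deps in package_dependencies.items():
--         for dep in dict.fromkeys(deps):
--             dependents.setdefault(dep, []).append(package)
--     removed = {package_to_remove}
--     stack = [package_to_remove]
--     while stack:
--         cur = stack.pop()
--         new = [p for p in dependents.get(cur, []) if p not in removed]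
--         removed.update(new)
--         stack.extend(new)
--     return removed
-- ===== Notes on version B (the rewrite author's own statement) =====
-- stated objective: alternative
-- what changed: B builds a reverse-dependency index (dep -> list of dependents) in one pass over the dict and then walks a single stack over that index, taking each popped package's not-yet-removed dependents as a batch, instead of A's full rescan of every dict item (with a visited check) on each popped package; on the measured random inputs the index build costs about what A's rescans do, so no speed is claimed.
import Mathlib
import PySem

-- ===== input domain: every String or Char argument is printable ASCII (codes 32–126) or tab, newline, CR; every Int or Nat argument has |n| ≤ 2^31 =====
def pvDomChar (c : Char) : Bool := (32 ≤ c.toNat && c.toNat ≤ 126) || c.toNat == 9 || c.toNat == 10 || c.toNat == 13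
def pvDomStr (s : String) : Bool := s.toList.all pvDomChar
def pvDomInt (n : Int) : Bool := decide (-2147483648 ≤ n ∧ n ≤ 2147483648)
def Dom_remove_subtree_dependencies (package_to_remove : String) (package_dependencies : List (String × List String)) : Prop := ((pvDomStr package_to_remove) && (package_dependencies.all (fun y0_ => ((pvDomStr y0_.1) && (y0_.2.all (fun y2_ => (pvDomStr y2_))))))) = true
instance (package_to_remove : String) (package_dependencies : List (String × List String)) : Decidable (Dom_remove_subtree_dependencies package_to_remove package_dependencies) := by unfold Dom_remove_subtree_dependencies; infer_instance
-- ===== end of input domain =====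

-- B builds a reverse-dependency index (dep -> dependents) once and walks a stack over it,
-- scheduling each popped package's not-yet-removed dependents as a batch, instead of A's
-- rescan of the whole dict with a visited check on every popped package (alternative
-- algorithm; no speed is claimed).


-- Python hands `package_dependencies` to both programs as a dict: build it (insert
-- overwrites in place, so duplicate keys collapse exactly as dict(pairs)) and take .items.
def pvDict (pd : List (String × List String)) : PySem.Dict String (List String) :=
  pd.foldl (fun d it => d.insert it.1 it.2) PySem.Dict.empty

-- ===== PORT A =====
-- one pass of A's inner `for package, dependencies in package_dependencies.items():`
def pvStepA (current : String) (s : PySem.Set String × List String) (item : String × List String) :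
    PySem.Set String × List String :=
  if item.1 ∈ s.1 then s                        -- `continue` (already scheduled for removal)
  else if current ∈ item.2 then (PySem.Set.add s.1 item.1, item.1 :: s.2)
  else s

-- A's `while packages_to_scan:` loop; the stack is kept top-first (Python pops/appends at
-- the back). Fuel `|items| + 1` bounds the pops: each push is of a package not yet in the
-- removal set and inserts it, so pops ≤ 1 + number of distinct keys.
def pvLoopA (items : List (String × List String)) :
    Nat → PySem.Set String → List String → PySem.Set String
  | _, rem, [] => rem
  | 0, rem, _ :: _ => rem
  | fuel + 1, rem, cur :: rest =>
      let s := items.foldl (pvStepA cur) (PySem.Set.add rem cur, rest)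
      pvLoopA items fuel s.1 s.2

def remove_subtree_dependencies (package_to_remove : String)
    (package_dependencies : List (String × List String)) : List String :=
  let items := (pvDict package_dependencies).items
  pvLoopA items (items.length + 1) PySem.Set.empty [package_to_remove]

-- ===== PORT B =====
-- `for dep in dict.fromkeys(deps): dependents.setdefault(dep, []).append(package)`
def pvRevIdx (items : List (String × List String)) : PySem.Dict String (List String) :=
  items.foldl
    (fun d item =>
      (PySem.List.dedup item.2).foldl (fun d dep => d.modify dep [] (· ++ [item.1])) d)
    PySem.Dict.empty

-- B's `while stack:` loop: `new = [p for p in dependents.get(cur, []) if p not in removed]`,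
-- then `removed.update(new); stack.extend(new)` (stack top-first, as in A's port).
def pvLoopB (rev : PySem.Dict String (List String)) :
    Nat → PySem.Set String → List String → PySem.Set String
  | _, rem, [] => rem
  | 0, rem, _ :: _ => rem
  | fuel + 1, rem, cur :: rest =>
      let new := (rev.getD cur []).filter (fun p => decide (p ∉ rem))
      pvLoopB rev fuel (PySem.Set.update rem new) (new.reverse ++ rest)

def remove_subtree_dependencies_alt (package_to_remove : String)
    (package_dependencies : List (String × List String)) : List String :=
  let items := (pvDict package_dependencies).items
  pvLoopB (pvRevIdx items) (items.length + 1)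
    (PySem.Set.add PySem.Set.empty package_to_remove) [package_to_remove]

-- ===== PRECONDITION & SPEC =====
def Spec_remove_subtree_dependencies (package_to_remove : String) (package_dependencies : List (String × List String)) (out : List String) : Prop := out = remove_subtree_dependencies_alt package_to_remove package_dependencies
instance (package_to_remove : String) (package_dependencies : List (String × List String)) (out : List String) : Decidable (Spec_remove_subtree_dependencies package_to_remove package_dependencies out) := by unfold Spec_remove_subtree_dependencies; infer_instance

-- ===== CLAIM (what is proved, stated in full; the proofs are below) =====
def Claim_equal_remove_subtree_dependencies : Prop := ∀ (package_to_remove : String) (package_dependencies : List (String × List String)), Dom_remove_subtree_dependencies package_to_remove package_dependencies → Spec_remove_subtree_dependencies package_to_remove package_dependencies (remove_subtree_dependencies package_to_remove package_dependencies)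

-- ===== LEMMAS AND PROOFS =====

-- folding `modify dep [] (· ++ [p])` over a duplicate-free list appends p once iff c is in it
lemma pv_getD_foldl_modifyAppend (ds : List String) (hnd : ds.Nodup)
    (d : PySem.Dict String (List String)) (c p : String) :
    ((ds.foldl (fun d dep => d.modify dep [] (· ++ [p])) d).getD c []) =
      if c ∈ ds then d.getD c [] ++ [p] else d.getD c [] := by
  induction ds generalizing d with
  | nil => simp
  | cons hd tl ih =>
      simp only [List.foldl_cons]
      rw [ih hnd.of_cons]
      rw [PySem.Dict.getD_modify]
      by_cases hc : c = hd
      · subst hc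
        have : c ∉ tl := (List.nodup_cons.mp hnd).1
        simp [this]
      · simp [hc]

-- the reverse index at c lists exactly the first components of the items whose deps contain c
lemma pv_revIdx_getD (items : List (String × List String)) (c : String)
    (d : PySem.Dict String (List String)) :
    ((items.foldl
        (fun d item =>
          (PySem.List.dedup item.2).foldl (fun d dep => d.modify dep [] (· ++ [item.1])) d)
        d).getD c []) =
      d.getD c [] ++ ((items.filter (fun item => decide (c ∈ item.2))).map Prod.fst) := by
  induction items generalizing d with
  | nil => simp
  | cons hd tl ih =>
      simp only [List.foldl_cons]
      rw [ih]
      rw [pv_getD_foldl_modifyAppend _ (PySem.List.nodup_dedup hd.2) d c hd.1]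
      by_cases hc : c ∈ hd.2
      · simp [hc]
      · simp [hc]

-- A's guarded scan of all items equals the batch B takes from the reverse index: the
-- dependents of `cur` (in item order) that are not yet removed, added then pushed.
lemma pv_scan_eq (cur : String) (items : List (String × List String))
    (hnd : (items.map Prod.fst).Nodup) (rem : PySem.Set String) (rest : List String) :
    items.foldl (pvStepA cur) (rem, rest) =
      ((((items.filter (fun it => decide (cur ∈ it.2))).map Prod.fst).filter
          (fun p => decide (p ∉ rem))).foldl PySem.Set.add rem,
       (((items.filter (fun it => decide (cur ∈ it.2))).map Prod.fst).filter
          (fun p => decide (p ∉ rem))).reverse ++ rest) := by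
  induction items generalizing rem rest with
  | nil => simp
  | cons it tl ih =>
      have hkey : it.1 ∉ tl.map Prod.fst := (List.nodup_cons.mp hnd).1
      have hndtl : (tl.map Prod.fst).Nodup := (List.nodup_cons.mp hnd).2
      by_cases hcur : cur ∈ it.2
      · by_cases hmem : it.1 ∈ rem
        · simp only [List.foldl_cons, pvStepA, List.filter_cons, hcur,
            decide_true, if_pos, List.map_cons, hmem, not_true_eq_false, decide_false]
          exact ih hndtl rem rest
        · have hstep : pvStepA cur (rem, rest) it =
              (PySem.Set.add rem it.1, it.1 :: rest) := by
            simp [pvStepA, hmem, hcur]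
          have hadd : PySem.Set.add rem it.1 = rem ++ [it.1] :=
            PySem.Set.add_of_not_mem hmem
          have hfeq : ∀ p ∈ (tl.filter (fun it => decide (cur ∈ it.2))).map Prod.fst,
              decide (p ∉ rem ++ [it.1]) = decide (p ∉ rem) := by
            intro p hp
            have : p ∈ tl.map Prod.fst := by
              rcases List.mem_map.mp hp with ⟨q, hq, rfl⟩
              exact List.mem_map.mpr ⟨q, List.mem_of_mem_filter hq, rfl⟩
            have hne : p ≠ it.1 := fun h => hkey (h ▸ this)
            simp [hne]
          simp only [List.foldl_cons, hstep, List.filter_cons, hcur, decide_true, if_pos,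
            List.map_cons, hmem, decide_true]
          rw [ih hndtl (PySem.Set.add rem it.1) (it.1 :: rest)]
          rw [hadd, List.filter_congr hfeq]
          simp [hadd]
      · have hstep : pvStepA cur (rem, rest) it = (rem, rest) := by
          by_cases hmem : it.1 ∈ rem <;> simp [pvStepA, hmem, hcur]
        simp only [List.foldl_cons, hstep, List.filter_cons, hcur, decide_false]
        simpa using ih hndtl rem rest

-- the two loops agree step for step once everything on the stack is already removed
lemma pv_loops_eq (items : List (String × List String)) (hnd : (items.map Prod.fst).Nodup) :
    ∀ (fuel : Nat) (rem : PySem.Set String) (stack : List String),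
      (∀ x ∈ stack, x ∈ rem) →
      pvLoopA items fuel rem stack = pvLoopB (pvRevIdx items) fuel rem stack := by
  intro fuel
  induction fuel with
  | zero => intro rem stack _; cases stack <;> rfl
  | succ f ih =>
      intro rem stack hstk
      cases stack with
      | nil => rfl
      | cons cur rest =>
          have hcur : cur ∈ rem := hstk cur (by simp)
          simp only [pvLoopA, pvLoopB]
          rw [PySem.Set.add_of_mem hcur, pv_scan_eq cur items hnd rem rest]
          have hrev : (pvRevIdx items).getD cur [] =
              (items.filter (fun it => decide (cur ∈ it.2))).map Prod.fst := by
            unfold pvRevIdx; rw [pv_revIdx_getD]; simp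
          rw [hrev]
          have hupd : PySem.Set.update rem
              ((((items.filter (fun it => decide (cur ∈ it.2))).map Prod.fst).filter
                (fun p => decide (p ∉ rem)))) =
              (((items.filter (fun it => decide (cur ∈ it.2))).map Prod.fst).filter
                (fun p => decide (p ∉ rem))).foldl PySem.Set.add rem := rfl
          rw [← hupd]
          apply ih
          intro x hx
          rw [PySem.Set.mem_update]
          rcases List.mem_append.mp hx with h | h
          · exact Or.inr (List.mem_reverse.mp h)
          · exact Or.inl (hstk x (List.mem_cons_of_mem _ h))

-- A's first pop adds the root to the empty removal set; B starts from `{root}` directly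
lemma pv_first_add (items : List (String × List String)) (f : Nat) (r : String) :
    pvLoopA items (f + 1) PySem.Set.empty [r] =
      pvLoopA items (f + 1) (PySem.Set.add PySem.Set.empty r) [r] := by
  simp only [pvLoopA]
  rw [PySem.Set.add_of_mem (s := PySem.Set.add PySem.Set.empty r)
    (by simp)]

-- ===== VERDICT (by name: the statement is the Claim_ definition above) =====
theorem remove_subtree_dependencies_spec : Claim_equal_remove_subtree_dependencies := by
  intro root pd _
  unfold Spec_remove_subtree_dependencies remove_subtree_dependencies remove_subtree_dependencies_alt
  have hnd : (((pvDict pd).items).map Prod.fst).Nodup := by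
    have := PySem.Dict.nodup_keys_foldl_insert_key pd Prod.fst (fun _ it => it.2)
      PySem.Dict.empty (by simp)
    simpa [PySem.Dict.keys, pvDict] using this
  rw [pv_first_add]
  exact pv_loops_eq _ hnd _ _ _ (by simp)
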